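-- pv_equiv track=rewrite | github.com/Shenile/Cracking-Coding-Interview-Book-Exercises | Chapter-1-Arrays-and-Strings/1.5-Substring_check.py | isSusbstring
-- ===== SOURCE A (Python) =====
-- def isSusbstring(string, substring):
--     map = {}
--     for s in string:
--        if s in map:
--            map[s] += 1
--        else:
--            map[s] = 1
--
--     for s in substring:
--         if s in map and map[s] > 1:
--             map[s] -= 1
--         else:
--             return False
--     return True
-- ===== SOURCE B (Python) =====
-- def isSusbstring(string, substring):
--     cs = {}
--     for c in string:
--         cs[c] = cs.get(c, 0) + 1
--     cb = {}
--     for c in substring: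
--         cb[c] = cb.get(c, 0) + 1
--     return all(cs.get(c, 0) > k for c, k in cb.items())
-- ===== Notes on version B (the rewrite author's own statement) =====
-- stated objective: simpler
-- what changed: B replaces A's in-place consuming loop (decrement the string's count map while scanning substring, early-return) with two immutable frequency tables and a single all() comparison requiring strict count_string(c) > count_substring(c).
import Mathlib
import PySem

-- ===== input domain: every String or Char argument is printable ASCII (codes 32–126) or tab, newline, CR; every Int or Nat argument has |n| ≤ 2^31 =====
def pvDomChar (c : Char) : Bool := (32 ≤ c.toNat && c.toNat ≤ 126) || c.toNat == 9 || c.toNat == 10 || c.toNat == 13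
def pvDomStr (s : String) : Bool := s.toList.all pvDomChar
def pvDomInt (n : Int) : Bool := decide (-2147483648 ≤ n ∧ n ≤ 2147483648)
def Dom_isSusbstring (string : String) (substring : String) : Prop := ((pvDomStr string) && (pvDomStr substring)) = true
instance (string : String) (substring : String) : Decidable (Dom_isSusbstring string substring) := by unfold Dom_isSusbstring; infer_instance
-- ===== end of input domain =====

-- ===== PORT A =====
-- A: build a count map of `string` (if s in map: +=1 else: =1), then scan `substring`,
-- decrementing while `s in map and map[s] > 1`, else return False.
def pvLoopA (m : PySem.Dict Char Int) : List Char → Bool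
  | [] => true
  | s :: rest =>
      if m.contains s && decide (m.getD s 0 > 1) then
        pvLoopA (m.modify s 0 (· - 1)) rest
      else
        false

def isSusbstring (string : String) (substring : String) : Bool :=
  let m := string.toList.foldl
    (fun d s => if d.contains s then d.modify s 0 (· + 1) else d.insert s 1)
    PySem.Dict.empty
  pvLoopA m substring.toList

-- ===== PORT B =====
-- B: two frequency tables, then all(cs.get(c,0) > k for c, k in cb.items()).
def isSusbstring_alt (string : String) (substring : String) : Bool :=
  ((substring.toList.foldl (fun d c => d.insert c (d.getD c 0 + 1)) (PySem.Dict.empty : PySem.Dict Char Int)).items).all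
    (fun p => decide ((string.toList.foldl (fun d c => d.insert c (d.getD c 0 + 1)) (PySem.Dict.empty : PySem.Dict Char Int)).getD p.1 0 > p.2))

-- ===== PRECONDITION & SPEC =====
def Spec_isSusbstring (string : String) (substring : String) (out : Bool) : Prop := out = isSusbstring_alt string substring
instance (string : String) (substring : String) (out : Bool) : Decidable (Spec_isSusbstring string substring out) := by unfold Spec_isSusbstring; infer_instance

-- ===== CLAIM (what is proved, stated in full; the proofs are below) =====
def Claim_equal_isSusbstring : Prop := ∀ (string : String) (substring : String), Dom_isSusbstring string substring → Spec_isSusbstring string substring (isSusbstring string substring)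

-- ===== LEMMAS AND PROOFS =====

-- A's build loop counts occurrences, same lookups as a counter.
lemma pvBuildA_getD (l : List Char) (d : PySem.Dict Char Int) (v : Char) :
    (l.foldl (fun d s => if d.contains s then d.modify s 0 (· + 1) else d.insert s 1) d).getD v 0
      = d.getD v 0 + l.count v := by
  induction l generalizing d with
  | nil => simp
  | cons x xs ih =>
      simp only [List.foldl_cons, ih]
      by_cases hc : d.contains x = true
      · rw [if_pos hc, PySem.Dict.getD_modify]
        by_cases hv : v = x
        · subst hv; rw [if_pos rfl, List.count_cons_self]; push_cast; ring
        · rw [if_neg hv, List.count_cons_of_ne (Ne.symm hv)]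
      · have h0 : d.getD x 0 = 0 :=
          PySem.Dict.getD_of_not_contains d 0 (by simpa using hc)
        rw [if_neg hc, PySem.Dict.getD_insert]
        by_cases hv : v = x
        · subst hv; rw [if_pos rfl, List.count_cons_self, h0]; push_cast; ring
        · rw [if_neg hv, List.count_cons_of_ne (Ne.symm hv)]

-- A's consuming loop succeeds iff every char of the list has strictly more budget than it occurs.
lemma pvLoopA_eq (l : List Char) :
    ∀ m : PySem.Dict Char Int,
      pvLoopA m l = decide (∀ c ∈ l, m.getD c 0 > (l.count c : Int)) := by
  induction l with
  | nil => intro m; simp [pvLoopA]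
  | cons x xs ih =>
      intro m
      by_cases hg : m.getD x 0 > 1
      · have hc : m.contains x = true := by
          by_contra h
          have : m.getD x 0 = 0 :=
            PySem.Dict.getD_of_not_contains m 0 (by simpa using h)
          omega
        rw [pvLoopA, if_pos (by simp [hc, hg]), ih]
        have key : (∀ c ∈ xs, (m.modify x 0 (· - 1)).getD c 0 > (xs.count c : Int))
            ↔ (∀ c ∈ x :: xs, m.getD c 0 > ((x :: xs).count c : Int)) := by
          constructor
          · intro h c hcmem
            rcases List.mem_cons.mp hcmem with rfl | hmem
            · by_cases hin : c ∈ xs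
              · have := h c hin
                rw [PySem.Dict.getD_modify, if_pos rfl] at this
                rw [List.count_cons_self]; push_cast; omega
              · rw [List.count_cons_self, List.count_eq_zero_of_not_mem hin]
                push_cast; omega
            · by_cases hcx : c = x
              · subst hcx
                have := h c hmem
                rw [PySem.Dict.getD_modify, if_pos rfl] at this
                rw [List.count_cons_self]; push_cast; omega
              · have := h c hmem
                rw [PySem.Dict.getD_modify, if_neg hcx] at this
                rw [List.count_cons_of_ne (Ne.symm hcx)]; exact this
          · intro h c hmem
            rw [PySem.Dict.getD_modify]
            by_cases hcx : c = x
            · subst hcx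
              have := h c (List.mem_cons_self)
              rw [List.count_cons_self] at this
              rw [if_pos rfl]; push_cast at this ⊢; omega
            · rw [if_neg hcx]
              have := h c (List.mem_cons.mpr (Or.inr hmem))
              rwa [List.count_cons_of_ne (Ne.symm hcx)] at this
        simp only [decide_eq_decide]
        exact key
      · have hguard : (m.contains x && decide (m.getD x 0 > 1)) = false := by
          simp [hg]
        rw [pvLoopA, hguard, if_neg (by simp)]
        symm
        simp only [decide_eq_false_iff_not]
        intro h
        have := h x List.mem_cons_self
        rw [List.count_cons_self] at this
        have hxc : (0 : Int) ≤ (xs.count x : Int) := by positivity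
        omega

-- B's items-all is the same universally-quantified strict comparison.
lemma pvAltB_eq (string substring : String) :
    isSusbstring_alt string substring
      = decide (∀ c ∈ substring.toList,
          ((string.toList.count c : Int) > (substring.toList.count c : Int))) := by
  unfold isSusbstring_alt
  rw [PySem.Dict.foldl_insert_getD_add_one_eq_counter,
      PySem.Dict.foldl_insert_getD_add_one_eq_counter,
      PySem.Dict.items_counter]
  rw [Bool.eq_iff_iff]
  simp only [List.all_map, List.all_eq_true, Function.comp_apply, decide_eq_true_eq,
    PySem.Dict.getD_counter]
  constructor
  · intro h c hc
    exact h c ((PySem.Set.mem_ofList _ _).mpr hc)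
  · intro h c hc
    exact h c ((PySem.Set.mem_ofList _ _).mp hc)

-- ===== VERDICT (by name: the statement is the Claim_ definition above) =====
theorem isSusbstring_spec : Claim_equal_isSusbstring := by
  intro string substring _
  unfold Spec_isSusbstring
  simp only [isSusbstring, pvLoopA_eq, pvAltB_eq, pvBuildA_getD,
    PySem.Dict.getD_empty, zero_add]
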